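-- pv_equiv track=rewrite | github.com/hadesloc/RampOS | sdk-python/src/rampos/cli/manifest.py | map_openapi_operation_to_command
-- ===== SOURCE A (Python) =====
-- def map_openapi_operation_to_command(operation_id: str) -> tuple[str, ...]:
--     aliases: dict[str, tuple[str, ...]] = {
--         "create_payin": ("intents", "create-payin"),
--         "confirm_payin": ("intents", "confirm-payin"),
--         "create_payout": ("intents", "create-payout"),
--         "list_intents": ("intents", "list"),
--         "get_intent": ("intents", "get"),
--         "list_entries": ("ledger", "entries"),
--         "list_balances": ("ledger", "balances"),
--         "get_dashboard": ("admin", "dashboard"),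
--         "health_check": ("health", "check"),
--         "readiness_check": ("health", "ready"),
--         "record_trade": ("events", "trade-executed"),
--         "get_user_balances": ("users", "balances"),
--         "get_user_balances_for_tenant": ("users", "balances"),
--         "get_bridge_quote": ("chain", "quote"),
--         "initiate_bridge": ("chain", "bridge"),
--         "list_chains": ("chain", "list"),
--         "get_chain_detail": ("chain", "get"),
--     }
--     if operation_id in aliases:
--         return aliases[operation_id]
--
--     verb_prefixes = (
--         ("create_", "create"),
--         ("confirm_", "confirm"),
--         ("list_", "list"),
--         ("get_", "get"),
--         ("update_", "update"),
--         ("delete_", "delete"),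
--         ("verify_", "verify"),
--         ("provision_", "provision"),
--         ("estimate_", "estimate"),
--         ("handle_", "handle"),
--         ("mint_", "mint"),
--         ("burn_", "burn"),
--     )
--     for prefix, verb in verb_prefixes:
--         if operation_id.startswith(prefix):
--             noun = operation_id[len(prefix) :]
--             return (noun.replace("_", "-"), verb)
--
--     return tuple(part for part in operation_id.split("_") if part)
-- ===== SOURCE B (Python) =====
-- _ALIAS_PAIRS = [
--     ("create_payin", ("intents", "create-payin")),
--     ("confirm_payin", ("intents", "confirm-payin")),
--     ("create_payout", ("intents", "create-payout")),
--     ("list_intents", ("intents", "list")),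
--     ("get_intent", ("intents", "get")),
--     ("list_entries", ("ledger", "entries")),
--     ("list_balances", ("ledger", "balances")),
--     ("get_dashboard", ("admin", "dashboard")),
--     ("health_check", ("health", "check")),
--     ("readiness_check", ("health", "ready")),
--     ("record_trade", ("events", "trade-executed")),
--     ("get_user_balances", ("users", "balances")),
--     ("get_user_balances_for_tenant", ("users", "balances")),
--     ("get_bridge_quote", ("chain", "quote")),
--     ("initiate_bridge", ("chain", "bridge")),
--     ("list_chains", ("chain", "list")),
--     ("get_chain_detail", ("chain", "get")),
-- ]
--
-- _VERBS = frozenset({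
--     "create", "confirm", "list", "get", "update", "delete",
--     "verify", "provision", "estimate", "handle", "mint", "burn",
-- })
--
--
-- def map_openapi_operation_to_command(operation_id: str) -> tuple[str, ...]:
--     for key, cmd in _ALIAS_PAIRS:
--         if key == operation_id:
--             return cmd
--     verb, sep, rest = operation_id.partition("_")
--     if sep and verb in _VERBS:
--         return (rest.replace("_", "-"), verb)
--     return tuple(filter(None, operation_id.split("_")))
-- ===== Notes on version B (the rewrite author's own statement) =====
-- stated objective: alternative
-- what changed: B scans a plain alias pair list instead of a dict, replaces the 12-iteration verb-prefix startswith loop with a single str.partition at the first underscore plus one membership test in a constant verb set, and uses a filter-based fallback.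
import Mathlib
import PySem

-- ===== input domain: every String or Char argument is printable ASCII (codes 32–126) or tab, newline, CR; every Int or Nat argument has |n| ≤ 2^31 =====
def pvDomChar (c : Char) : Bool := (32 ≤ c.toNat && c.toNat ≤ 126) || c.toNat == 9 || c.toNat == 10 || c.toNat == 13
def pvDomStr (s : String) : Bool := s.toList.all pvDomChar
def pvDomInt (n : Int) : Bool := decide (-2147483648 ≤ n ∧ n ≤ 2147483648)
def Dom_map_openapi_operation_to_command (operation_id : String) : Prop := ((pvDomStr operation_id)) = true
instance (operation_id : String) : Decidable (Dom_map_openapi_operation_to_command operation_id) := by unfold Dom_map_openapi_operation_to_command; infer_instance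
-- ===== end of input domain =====

-- B replaces A's dict lookup by a linear scan of a plain alias pair list and A's 12-iteration
-- verb-prefix loop by one str.partition at the first underscore plus a constant verb-set membership test (objective: alternative).

-- ===== PORT A =====
-- the alias dict of Source A
def mootcA_aliases : PySem.Dict String (List String) := PySem.Dict.ofList [
  ("create_payin", ["intents", "create-payin"]),
  ("confirm_payin", ["intents", "confirm-payin"]),
  ("create_payout", ["intents", "create-payout"]),
  ("list_intents", ["intents", "list"]),
  ("get_intent", ["intents", "get"]),
  ("list_entries", ["ledger", "entries"]),
  ("list_balances", ["ledger", "balances"]),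
  ("get_dashboard", ["admin", "dashboard"]),
  ("health_check", ["health", "check"]),
  ("readiness_check", ["health", "ready"]),
  ("record_trade", ["events", "trade-executed"]),
  ("get_user_balances", ["users", "balances"]),
  ("get_user_balances_for_tenant", ["users", "balances"]),
  ("get_bridge_quote", ["chain", "quote"]),
  ("initiate_bridge", ["chain", "bridge"]),
  ("list_chains", ["chain", "list"]),
  ("get_chain_detail", ["chain", "get"])]

-- tuple(part for part in operation_id.split("_") if part)
def mootcA_fallback (operation_id : String) : List String :=
  ((PySem.Str.split? operation_id "_").getD []).filter (fun part => part != "")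

def mootcA_verb_prefixes : List (String × String) := [
  ("create_", "create"), ("confirm_", "confirm"), ("list_", "list"), ("get_", "get"),
  ("update_", "update"), ("delete_", "delete"), ("verify_", "verify"), ("provision_", "provision"),
  ("estimate_", "estimate"), ("handle_", "handle"), ("mint_", "mint"), ("burn_", "burn")]

-- the 'for prefix, verb in verb_prefixes' loop with its early return
def mootcA_loop (operation_id : String) : List (String × String) → List String
  | [] => mootcA_fallback operation_id
  | (pre, verb) :: rest =>
    if PySem.Str.startswith operation_id pre then
      [PySem.Str.replace (PySem.Str.slice operation_id (some (PySem.Str.len pre)) none) "_" "-", verb]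
    else mootcA_loop operation_id rest

def map_openapi_operation_to_command (operation_id : String) : List String :=
  match mootcA_aliases.get? operation_id with
  | some cmd => cmd
  | none => mootcA_loop operation_id mootcA_verb_prefixes

-- ===== PORT B =====
-- _ALIAS_PAIRS of Source B: a plain association list
def mootcB_aliasPairs : List (String × List String) := [
  ("create_payin", ["intents", "create-payin"]),
  ("confirm_payin", ["intents", "confirm-payin"]),
  ("create_payout", ["intents", "create-payout"]),
  ("list_intents", ["intents", "list"]),
  ("get_intent", ["intents", "get"]),
  ("list_entries", ["ledger", "entries"]),
  ("list_balances", ["ledger", "balances"]),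
  ("get_dashboard", ["admin", "dashboard"]),
  ("health_check", ["health", "check"]),
  ("readiness_check", ["health", "ready"]),
  ("record_trade", ["events", "trade-executed"]),
  ("get_user_balances", ["users", "balances"]),
  ("get_user_balances_for_tenant", ["users", "balances"]),
  ("get_bridge_quote", ["chain", "quote"]),
  ("initiate_bridge", ["chain", "bridge"]),
  ("list_chains", ["chain", "list"]),
  ("get_chain_detail", ["chain", "get"])]

-- Source B's 'for key, cmd in _ALIAS_PAIRS: if key == operation_id: return cmd'
def mootcB_scan (operation_id : String) : List (String × List String) → Option (List String)
  | [] => none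
  | (key, cmd) :: rest =>
    if key == operation_id then some cmd else mootcB_scan operation_id rest

-- _VERBS frozenset of Source B
def mootcB_verbs : PySem.Set String := PySem.Set.ofList
  ["create", "confirm", "list", "get", "update", "delete",
   "verify", "provision", "estimate", "handle", "mint", "burn"]

-- operation_id.partition("_"): hand port (no PySem primitive); exact for a one-character
-- separator: the text before the first '_', the '_' itself, and the remainder (or (s,"","")).
def mootcB_partition (s : String) : String × String × String :=
  if '_' ∈ s.toList then
    (String.ofList (s.toList.takeWhile (· ≠ '_')), "_",
     String.ofList ((s.toList.dropWhile (· ≠ '_')).tail))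
  else (s, "", "")

-- tuple(filter(None, operation_id.split("_")))
def mootcB_fallback (operation_id : String) : List String :=
  ((PySem.Str.split? operation_id "_").getD []).filter (fun part => part ≠ "")

def map_openapi_operation_to_command_alt (operation_id : String) : List String :=
  match mootcB_scan operation_id mootcB_aliasPairs with
  | some cmd => cmd
  | none =>
    match mootcB_partition operation_id with
    | (verb, sep, rest) =>
      if sep != "" && mootcB_verbs.contains verb then
        [PySem.Str.replace rest "_" "-", verb]
      else mootcB_fallback operation_id

-- ===== PRECONDITION & SPEC =====
def Spec_map_openapi_operation_to_command (operation_id : String) (out : List String) : Prop := out = map_openapi_operation_to_command_alt operation_id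
instance (operation_id : String) (out : List String) : Decidable (Spec_map_openapi_operation_to_command operation_id out) := by unfold Spec_map_openapi_operation_to_command; infer_instance

-- ===== CLAIM (what is proved, stated in full; the proofs are below) =====
def Claim_equal_map_openapi_operation_to_command : Prop := ∀ (operation_id : String), Dom_map_openapi_operation_to_command operation_id → Spec_map_openapi_operation_to_command operation_id (map_openapi_operation_to_command operation_id)

-- ===== LEMMAS AND PROOFS =====

-- A's dict lookup agrees with B's linear scan over the same pairs
theorem mootc_scan_mk (s : String) (l : List (String × List String)) :
    (PySem.Dict.mk l).get? s = mootcB_scan s l := by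
  induction l with
  | nil => rfl
  | cons p rest ih =>
    obtain ⟨k, v⟩ := p
    rw [PySem.Dict.get?_mk_cons, mootcB_scan, ih]

theorem mootc_alias_eq (s : String) :
    mootcA_aliases.get? s = mootcB_scan s mootcB_aliasPairs := by
  rw [show mootcA_aliases = PySem.Dict.mk mootcB_aliasPairs from by decide]
  exact mootc_scan_mk s mootcB_aliasPairs

-- the two fallback expressions coincide (bne vs. decidable ≠)
theorem mootc_fallback_eq (s : String) : mootcA_fallback s = mootcB_fallback s := by
  unfold mootcA_fallback mootcB_fallback
  congr 1
  funext part
  by_cases h : part = "" <;> simp [h]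

theorem mootc_takeWhile_app (v t : List Char) (hv : '_' ∉ v) :
    (v ++ '_' :: t).takeWhile (· ≠ '_') = v := by
  induction v with
  | nil => simp
  | cons a l ih =>
    have ha : a ≠ '_' := by intro h; exact hv (by simp [h])
    have ih' := ih (by intro h; exact hv (by simp [h]))
    simpa [ha] using ih'

-- the head of dropWhile is the first underscore
theorem mootc_dropWhile_cons (cs : List Char) (hin : '_' ∈ cs) :
    cs.dropWhile (· ≠ '_') = '_' :: (cs.dropWhile (· ≠ '_')).tail := by
  have hsplit := List.takeWhile_append_dropWhile (p := (· ≠ '_')) (l := cs)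
  have hne : cs.dropWhile (· ≠ '_') ≠ [] := by
    intro hnil
    rw [hnil, List.append_nil] at hsplit
    rw [← hsplit] at hin
    have := List.mem_takeWhile_imp hin
    simp at this
  have hhead : (cs.dropWhile (· ≠ '_')).head hne = '_' := by
    have := List.head_dropWhile_not (p := (· ≠ '_')) (l := cs) hne
    simpa using this
  nth_rewrite 1 [← List.cons_head_tail hne]
  rw [hhead]

-- startswith, rephrased as a condition on the first underscore
theorem mootc_startswith (s pre v : String) (hpre : pre.toList = v.toList ++ ['_'])
    (hv : '_' ∉ v.toList) :
    PySem.Str.startswith s pre = ('_' ∈ s.toList ∧ s.toList.takeWhile (· ≠ '_') = v.toList : Bool) := by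
  rw [PySem.Str.startswith_eq, hpre]
  rcases hb : PySem.Chars.startswith s.toList (v.toList ++ ['_']) with _ | _
  · rw [eq_comm]
    simp only [decide_eq_false_iff_not]
    rintro ⟨hin, htw⟩
    have hdw := mootc_dropWhile_cons s.toList hin
    have hs := List.takeWhile_append_dropWhile (p := (· ≠ '_')) (l := s.toList)
    have : PySem.Chars.startswith s.toList (v.toList ++ ['_']) = true := by
      rw [PySem.Chars.startswith_iff]
      exact ⟨(s.toList.dropWhile (· ≠ '_')).tail, by rw [List.append_assoc, List.singleton_append, ← htw, ← hdw, hs]⟩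
    rw [this] at hb; cases hb
  · rw [PySem.Chars.startswith_iff] at hb
    obtain ⟨t, ht⟩ := hb
    rw [List.append_assoc, List.singleton_append] at ht
    rw [eq_comm]
    simp only [decide_eq_true_iff]
    constructor
    · rw [← ht]; simp
    · rw [← ht, mootc_takeWhile_app _ _ hv]

-- noun = operation_id[len(prefix):] equals the remainder after the first underscore
theorem mootc_drop (cs v : List Char) (_hv : '_' ∉ v) (htw : cs.takeWhile (· ≠ '_') = v)
    (hin : '_' ∈ cs) :
    cs.drop (v.length + 1) = (cs.dropWhile (· ≠ '_')).tail := by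
  have hdw := mootc_dropWhile_cons cs hin
  have hs := List.takeWhile_append_dropWhile (p := (· ≠ '_')) (l := cs)
  rw [htw, hdw] at hs
  conv_lhs => rw [← hs]
  rw [show v ++ '_' :: (cs.dropWhile (· ≠ '_')).tail
      = (v ++ ['_']) ++ (cs.dropWhile (· ≠ '_')).tail by simp]
  rw [show v.length + 1 = (v ++ ['_']).length by simp, List.drop_left]

-- the value A returns in a matched verb branch equals the value B returns on the partition path
theorem mootc_branch (s pre v : String) (hpre : pre.toList = v.toList ++ ['_'])
    (hv : '_' ∉ v.toList) (hin : '_' ∈ s.toList)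
    (htw : s.toList.takeWhile (· ≠ '_') = v.toList) :
    [PySem.Str.replace (PySem.Str.slice s (some (PySem.Str.len pre)) none) "_" "-", v] =
    [PySem.Str.replace (String.ofList ((s.toList.dropWhile (· ≠ '_')).tail)) "_" "-",
     String.ofList (s.toList.takeWhile (· ≠ '_'))] := by
  have h2 : String.ofList (s.toList.takeWhile (· ≠ '_')) = v := by
    rw [htw, String.ofList_toList]
  have hlen : PySem.Str.len pre = ((v.toList.length + 1 : Nat) : Int) := by
    rw [PySem.Str.len, hpre]; simp
  have h1 : (PySem.Str.slice s (some (PySem.Str.len pre)) none).toList =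
      (String.ofList ((s.toList.dropWhile (· ≠ '_')).tail)).toList := by
    rw [PySem.Str.toList_slice, PySem.Chars.slice_eq_listSlice, hlen,
      PySem.List.slice_from _ (by positivity), String.toList_ofList]
    simp only [Int.toNat_natCast]
    exact mootc_drop s.toList v.toList hv htw hin
  have h1' : PySem.Str.replace (PySem.Str.slice s (some (PySem.Str.len pre)) none) "_" "-" =
      PySem.Str.replace (String.ofList ((s.toList.dropWhile (· ≠ '_')).tail)) "_" "-" := by
    unfold PySem.Str.replace
    rw [h1]
  rw [h1', h2]

-- ===== VERDICT (by name: the statement is the Claim_ definition above) =====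
theorem map_openapi_operation_to_command_spec : Claim_equal_map_openapi_operation_to_command := by
  intro s _
  unfold Spec_map_openapi_operation_to_command
  unfold map_openapi_operation_to_command map_openapi_operation_to_command_alt
  rw [mootc_alias_eq s]
  cases halias : mootcB_scan s mootcB_aliasPairs with
  | some cmd => rfl
  | none =>
    simp only
    by_cases hin : '_' ∈ s.toList
    · rw [show mootcB_partition s =
        (String.ofList (s.toList.takeWhile (· ≠ '_')), "_",
         String.ofList ((s.toList.dropWhile (· ≠ '_')).tail)) from by
          unfold mootcB_partition; rw [if_pos hin]]
      simp only [mootcA_loop, mootcA_verb_prefixes,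
        mootc_startswith s "create_" "create" (by decide) (by decide),
        mootc_startswith s "confirm_" "confirm" (by decide) (by decide),
        mootc_startswith s "list_" "list" (by decide) (by decide),
        mootc_startswith s "get_" "get" (by decide) (by decide),
        mootc_startswith s "update_" "update" (by decide) (by decide),
        mootc_startswith s "delete_" "delete" (by decide) (by decide),
        mootc_startswith s "verify_" "verify" (by decide) (by decide),
        mootc_startswith s "provision_" "provision" (by decide) (by decide),
        mootc_startswith s "estimate_" "estimate" (by decide) (by decide),
        mootc_startswith s "handle_" "handle" (by decide) (by decide),
        mootc_startswith s "mint_" "mint" (by decide) (by decide),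
        mootc_startswith s "burn_" "burn" (by decide) (by decide),
        hin, true_and,
        show (("_" : String) != "") = true from rfl, Bool.true_and]
      by_cases h1 : s.toList.takeWhile (· ≠ '_') = "create".toList
      · rw [if_pos (decide_eq_true h1),
          mootc_branch s "create_" "create" (by decide) (by decide) hin h1,
          if_pos (show mootcB_verbs.contains (String.ofList (s.toList.takeWhile (· ≠ '_'))) = true by
            rw [h1]; decide)]
      rw [if_neg (by simpa using h1)]
      by_cases h2 : s.toList.takeWhile (· ≠ '_') = "confirm".toList
      · rw [if_pos (decide_eq_true h2),
          mootc_branch s "confirm_" "confirm" (by decide) (by decide) hin h2,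
          if_pos (show mootcB_verbs.contains (String.ofList (s.toList.takeWhile (· ≠ '_'))) = true by
            rw [h2]; decide)]
      rw [if_neg (by simpa using h2)]
      by_cases h3 : s.toList.takeWhile (· ≠ '_') = "list".toList
      · rw [if_pos (decide_eq_true h3),
          mootc_branch s "list_" "list" (by decide) (by decide) hin h3,
          if_pos (show mootcB_verbs.contains (String.ofList (s.toList.takeWhile (· ≠ '_'))) = true by
            rw [h3]; decide)]
      rw [if_neg (by simpa using h3)]
      by_cases h4 : s.toList.takeWhile (· ≠ '_') = "get".toList
      · rw [if_pos (decide_eq_true h4),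
          mootc_branch s "get_" "get" (by decide) (by decide) hin h4,
          if_pos (show mootcB_verbs.contains (String.ofList (s.toList.takeWhile (· ≠ '_'))) = true by
            rw [h4]; decide)]
      rw [if_neg (by simpa using h4)]
      by_cases h5 : s.toList.takeWhile (· ≠ '_') = "update".toList
      · rw [if_pos (decide_eq_true h5),
          mootc_branch s "update_" "update" (by decide) (by decide) hin h5,
          if_pos (show mootcB_verbs.contains (String.ofList (s.toList.takeWhile (· ≠ '_'))) = true by
            rw [h5]; decide)]
      rw [if_neg (by simpa using h5)]
      by_cases h6 : s.toList.takeWhile (· ≠ '_') = "delete".toList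
      · rw [if_pos (decide_eq_true h6),
          mootc_branch s "delete_" "delete" (by decide) (by decide) hin h6,
          if_pos (show mootcB_verbs.contains (String.ofList (s.toList.takeWhile (· ≠ '_'))) = true by
            rw [h6]; decide)]
      rw [if_neg (by simpa using h6)]
      by_cases h7 : s.toList.takeWhile (· ≠ '_') = "verify".toList
      · rw [if_pos (decide_eq_true h7),
          mootc_branch s "verify_" "verify" (by decide) (by decide) hin h7,
          if_pos (show mootcB_verbs.contains (String.ofList (s.toList.takeWhile (· ≠ '_'))) = true by
            rw [h7]; decide)]
      rw [if_neg (by simpa using h7)]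
      by_cases h8 : s.toList.takeWhile (· ≠ '_') = "provision".toList
      · rw [if_pos (decide_eq_true h8),
          mootc_branch s "provision_" "provision" (by decide) (by decide) hin h8,
          if_pos (show mootcB_verbs.contains (String.ofList (s.toList.takeWhile (· ≠ '_'))) = true by
            rw [h8]; decide)]
      rw [if_neg (by simpa using h8)]
      by_cases h9 : s.toList.takeWhile (· ≠ '_') = "estimate".toList
      · rw [if_pos (decide_eq_true h9),
          mootc_branch s "estimate_" "estimate" (by decide) (by decide) hin h9,
          if_pos (show mootcB_verbs.contains (String.ofList (s.toList.takeWhile (· ≠ '_'))) = true by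
            rw [h9]; decide)]
      rw [if_neg (by simpa using h9)]
      by_cases h10 : s.toList.takeWhile (· ≠ '_') = "handle".toList
      · rw [if_pos (decide_eq_true h10),
          mootc_branch s "handle_" "handle" (by decide) (by decide) hin h10,
          if_pos (show mootcB_verbs.contains (String.ofList (s.toList.takeWhile (· ≠ '_'))) = true by
            rw [h10]; decide)]
      rw [if_neg (by simpa using h10)]
      by_cases h11 : s.toList.takeWhile (· ≠ '_') = "mint".toList
      · rw [if_pos (decide_eq_true h11),
          mootc_branch s "mint_" "mint" (by decide) (by decide) hin h11,
          if_pos (show mootcB_verbs.contains (String.ofList (s.toList.takeWhile (· ≠ '_'))) = true by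
            rw [h11]; decide)]
      rw [if_neg (by simpa using h11)]
      by_cases h12 : s.toList.takeWhile (· ≠ '_') = "burn".toList
      · rw [if_pos (decide_eq_true h12),
          mootc_branch s "burn_" "burn" (by decide) (by decide) hin h12,
          if_pos (show mootcB_verbs.contains (String.ofList (s.toList.takeWhile (· ≠ '_'))) = true by
            rw [h12]; decide)]
      rw [if_neg (by simpa using h12)]
      have hvl : mootcB_verbs = ["create", "confirm", "list", "get", "update", "delete",
          "verify", "provision", "estimate", "handle", "mint", "burn"] := by decide
      rw [if_neg ?hf, mootc_fallback_eq]
      case hf =>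
        intro hc
        rw [hvl] at hc
        simp at hc
        rcases hc with h|h|h|h|h|h|h|h|h|h|h|h <;>
          first
          | exact h1 (by have h' := congrArg String.toList h; rw [String.toList_ofList] at h'; simpa using h')
          | exact h2 (by have h' := congrArg String.toList h; rw [String.toList_ofList] at h'; simpa using h')
          | exact h3 (by have h' := congrArg String.toList h; rw [String.toList_ofList] at h'; simpa using h')
          | exact h4 (by have h' := congrArg String.toList h; rw [String.toList_ofList] at h'; simpa using h')
          | exact h5 (by have h' := congrArg String.toList h; rw [String.toList_ofList] at h'; simpa using h')
          | exact h6 (by have h' := congrArg String.toList h; rw [String.toList_ofList] at h'; simpa using h')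
          | exact h7 (by have h' := congrArg String.toList h; rw [String.toList_ofList] at h'; simpa using h')
          | exact h8 (by have h' := congrArg String.toList h; rw [String.toList_ofList] at h'; simpa using h')
          | exact h9 (by have h' := congrArg String.toList h; rw [String.toList_ofList] at h'; simpa using h')
          | exact h10 (by have h' := congrArg String.toList h; rw [String.toList_ofList] at h'; simpa using h')
          | exact h11 (by have h' := congrArg String.toList h; rw [String.toList_ofList] at h'; simpa using h')
          | exact h12 (by have h' := congrArg String.toList h; rw [String.toList_ofList] at h'; simpa using h')
    · rw [show mootcB_partition s = (s, "", "") from by unfold mootcB_partition; rw [if_neg hin]]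
      simp only [mootcA_loop, mootcA_verb_prefixes,
        mootc_startswith s "create_" "create" (by decide) (by decide),
        mootc_startswith s "confirm_" "confirm" (by decide) (by decide),
        mootc_startswith s "list_" "list" (by decide) (by decide),
        mootc_startswith s "get_" "get" (by decide) (by decide),
        mootc_startswith s "update_" "update" (by decide) (by decide),
        mootc_startswith s "delete_" "delete" (by decide) (by decide),
        mootc_startswith s "verify_" "verify" (by decide) (by decide),
        mootc_startswith s "provision_" "provision" (by decide) (by decide),
        mootc_startswith s "estimate_" "estimate" (by decide) (by decide),
        mootc_startswith s "handle_" "handle" (by decide) (by decide),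
        mootc_startswith s "mint_" "mint" (by decide) (by decide),
        mootc_startswith s "burn_" "burn" (by decide) (by decide),
        hin, false_and, decide_false, Bool.false_eq_true, if_false]
      rw [show ((("" : String) != "") && mootcB_verbs.contains s) = false from by simp,
        if_neg (by simp), mootc_fallback_eq]
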